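-- pv_equiv track=rewrite | github.com/KauaRios/PYTHON-AULAS | estudos casa/Minha função.py | minhafunc
-- ===== SOURCE A (Python) =====
-- def minhafunc(x, y):
--     # Garante que x seja menor que y, independentemente da ordem
--     inicio = min(x, y)
--     fim = max(x, y)
--
--     impares = []
--     pares = []
--
--     for num in range(inicio, fim + 1):
--         if num % 2 == 0:
--             pares.append(num)
--         else:
--             impares.append(num)
--
--     return impares, pares
-- ===== SOURCE B (Python) =====
-- def minhafunc(x, y):
--     inicio, fim = (x, y) if x <= y else (y, x)
--     first_odd = inicio if inicio % 2 != 0 else inicio + 1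
--     first_even = inicio if inicio % 2 == 0 else inicio + 1
--     return list(range(first_odd, fim + 1, 2)), list(range(first_even, fim + 1, 2))
-- ===== Notes on version B (the rewrite author's own statement) =====
-- stated objective: idiomatic
-- what changed: Replaces the full-range loop with a per-element parity branch appending to two lists by two independent stride-2 range constructions starting at the first odd / first even number.
import Mathlib
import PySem

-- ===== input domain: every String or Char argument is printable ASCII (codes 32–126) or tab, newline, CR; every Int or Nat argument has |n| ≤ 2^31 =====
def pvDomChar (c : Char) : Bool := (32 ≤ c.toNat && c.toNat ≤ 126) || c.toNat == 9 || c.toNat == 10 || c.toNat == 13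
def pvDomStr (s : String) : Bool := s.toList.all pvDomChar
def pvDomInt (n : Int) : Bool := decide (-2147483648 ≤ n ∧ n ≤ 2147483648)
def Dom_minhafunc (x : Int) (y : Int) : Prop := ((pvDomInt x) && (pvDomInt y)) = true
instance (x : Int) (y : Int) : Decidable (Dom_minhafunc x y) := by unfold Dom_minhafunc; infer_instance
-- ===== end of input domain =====

-- B replaces A's full-range loop with a parity branch by two independent stride-2 ranges (idiomatic).


-- ===== PORT A =====
def minhafunc (x : Int) (y : Int) : List Int × List Int :=
  let inicio := min x y
  let fim := max x y
  let s :=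
    (PySem.List.pyRange inicio (fim + 1) 1).foldl
      (fun (acc : List Int × List Int) num =>
        if PySem.Int.mod num 2 = 0 then (acc.1, acc.2 ++ [num])
        else (acc.1 ++ [num], acc.2))
      ([], [])
  (s.1, s.2)

-- ===== PORT B =====
def minhafunc_alt (x : Int) (y : Int) : List Int × List Int :=
  let inicio := if x ≤ y then x else y
  let fim := if x ≤ y then y else x
  let firstOdd := if PySem.Int.mod inicio 2 ≠ 0 then inicio else inicio + 1
  let firstEven := if PySem.Int.mod inicio 2 = 0 then inicio else inicio + 1
  (PySem.List.pyRange firstOdd (fim + 1) 2, PySem.List.pyRange firstEven (fim + 1) 2)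

-- ===== PRECONDITION & SPEC =====
def Spec_minhafunc (x : Int) (y : Int) (out : List Int × List Int) : Prop := out = minhafunc_alt x y
instance (x : Int) (y : Int) (out : List Int × List Int) : Decidable (Spec_minhafunc x y out) := by unfold Spec_minhafunc; infer_instance

-- ===== CLAIM (what is proved, stated in full; the proofs are below) =====
def Claim_equal_minhafunc : Prop := ∀ (x : Int) (y : Int), Dom_minhafunc x y → Spec_minhafunc x y (minhafunc x y)

-- ===== LEMMAS AND PROOFS =====

theorem pymod_two (a : Int) : PySem.Int.mod a 2 = a % 2 := by
  simp [PySem.Int.mod, Int.fmod_eq_emod]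

theorem pyRange_two_nil (a b : Int) (h : b ≤ a) : PySem.List.pyRange a b 2 = [] := by
  rw [PySem.List.pyRange_of_pos a b (by norm_num)]
  simp [show ¬ a < b by omega]

theorem pyRange_two_cons (a b : Int) (h : a < b) :
    PySem.List.pyRange a b 2 = a :: PySem.List.pyRange (a + 2) b 2 := by
  rw [PySem.List.pyRange_of_pos a b (by norm_num),
      PySem.List.pyRange_of_pos (a + 2) b (by norm_num)]
  have hcount : (if a < b then ((b - a + 2 - 1) / 2).toNat else 0)
      = (if a + 2 < b then ((b - (a + 2) + 2 - 1) / 2).toNat else 0) + 1 := by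
    split <;> split <;> omega
  rw [hcount, List.range_succ_eq_map, List.map_cons, List.map_map]
  refine congrArg₂ _ (by simp) (List.map_congr_left ?_)
  intro k _
  push_cast [Function.comp_def]
  ring

theorem loop_split (n : Nat) (a b : Int) (hn : (b - a).toNat = n) (imp par : List Int) :
    (PySem.List.pyRange a b 1).foldl
      (fun (acc : List Int × List Int) num =>
        if PySem.Int.mod num 2 = 0 then (acc.1, acc.2 ++ [num])
        else (acc.1 ++ [num], acc.2))
      (imp, par)
    = (imp ++ PySem.List.pyRange (if PySem.Int.mod a 2 ≠ 0 then a else a + 1) b 2,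
       par ++ PySem.List.pyRange (if PySem.Int.mod a 2 = 0 then a else a + 1) b 2) := by
  induction n generalizing a imp par with
  | zero =>
    have hba : b ≤ a := by omega
    rw [PySem.List.pyRange_one_eq_nil hba]
    rw [pyRange_two_nil _ _ (by split <;> omega), pyRange_two_nil _ _ (by split <;> omega)]
    simp
  | succ n ih =>
    have hab : a < b := by omega
    rw [PySem.List.pyRange_one_cons hab]
    simp only [List.foldl_cons]
    by_cases hp : PySem.Int.mod a 2 = 0
    · have hp' : PySem.Int.mod (a + 1) 2 ≠ 0 := by
        rw [pymod_two] at hp ⊢; omega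
      rw [if_pos hp]
      rw [ih (a + 1) (by omega) imp (par ++ [a])]
      rw [if_pos hp', if_neg hp', if_pos hp, if_neg (not_not_intro hp),
          show a + 1 + 1 = a + 2 by ring, pyRange_two_cons a b hab]
      simp
    · have hp' : PySem.Int.mod (a + 1) 2 = 0 := by
        rw [pymod_two] at hp ⊢; omega
      rw [if_neg hp]
      rw [ih (a + 1) (by omega) (imp ++ [a]) par]
      rw [if_neg (not_not_intro hp'), if_pos hp', if_pos hp, if_neg hp,
          show a + 1 + 1 = a + 2 by ring, pyRange_two_cons a b hab]
      simp

-- ===== VERDICT (by name: the statement is the Claim_ definition above) =====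
theorem minhafunc_spec : Claim_equal_minhafunc := by
  intro x y _
  show minhafunc x y = minhafunc_alt x y
  unfold minhafunc minhafunc_alt
  have hmin : min x y = if x ≤ y then x else y := by rw [min_def]
  have hmax : max x y = if x ≤ y then y else x := by rw [max_def]
  simp only [hmin, hmax]
  rw [loop_split ((if x ≤ y then y else x) + 1 - (if x ≤ y then x else y)).toNat
       _ _ rfl [] []]
  simp
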